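-- pv_equiv track=rewrite | github.com/kosvi/Ohjelmistokehityksen-teknologioita | opettajan_postinumerot.py | tarkista_samankaltaisuus
-- ===== SOURCE A (Python) =====
-- def tarkista_samankaltaisuus(sana1, sana2):
--     typo = False
--     vaihdot = 0
--     samat = 0
--     if sana1[0]==sana2[0]:
--         samat += 1
--     for i in range(1, len(sana1)):
--         if sana1[i]==sana2[i]:
--             samat += 1
--         if sana1[i]!=sana2[i]:
--             if sana1[i]==sana2[i-1] and sana1[i-1]==sana2[i]:
--                 vaihdot += 1
--     if samat == len(sana1)-2 and vaihdot == 1: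
--         typo = True
--     return typo
-- ===== SOURCE B (Python) =====
-- def tarkista_samankaltaisuus(sana1, sana2):
--     diffs = [i for i in range(len(sana1)) if sana1[i] != sana2[i]]
--     if len(diffs) != 2:
--         return False
--     p, q = diffs
--     return q == p + 1 and sana1[p] == sana2[q] and sana1[q] == sana2[p]
-- ===== Notes on version B (the rewrite author's own statement) =====
-- stated objective: simpler
-- what changed: B collects the list of differing positions in one comprehension and decides from its shape (exactly two, adjacent, transposed) instead of running two counters with a lagged cross-comparison inside the loop.
import Mathlib
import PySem

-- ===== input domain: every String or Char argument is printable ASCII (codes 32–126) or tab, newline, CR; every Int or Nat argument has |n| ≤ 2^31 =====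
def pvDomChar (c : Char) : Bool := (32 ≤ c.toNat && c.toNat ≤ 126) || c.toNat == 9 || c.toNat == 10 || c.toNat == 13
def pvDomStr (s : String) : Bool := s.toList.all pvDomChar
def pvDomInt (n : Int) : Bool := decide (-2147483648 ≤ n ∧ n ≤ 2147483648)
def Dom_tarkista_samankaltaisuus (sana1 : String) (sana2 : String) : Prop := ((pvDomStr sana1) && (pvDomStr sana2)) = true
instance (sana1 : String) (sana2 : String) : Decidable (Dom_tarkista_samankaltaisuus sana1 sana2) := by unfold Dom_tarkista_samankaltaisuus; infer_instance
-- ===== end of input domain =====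

-- B replaces A's two running counters (equal-position count plus lagged cross-comparison count)
-- by collecting the list of differing positions once and deciding from its shape; objective: simpler.

-- ===== PORT A =====
-- A's loop body over the character lists (sana1[i] → pyGetD on the toList side; IndexError cases excluded by Pre_)
def pvACore (l1 l2 : List Char) : Bool :=
  let samat0 : Int := if PySem.List.pyGetD l1 0 ' ' = PySem.List.pyGetD l2 0 ' ' then 1 else 0
  let sv := (PySem.List.pyRange 1 (l1.length : Int) 1).foldl
    (fun (sv : Int × Int) i =>
      (if PySem.List.pyGetD l1 i ' ' = PySem.List.pyGetD l2 i ' ' then sv.1 + 1 else sv.1,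
       if ¬ (PySem.List.pyGetD l1 i ' ' = PySem.List.pyGetD l2 i ' ') then
         if PySem.List.pyGetD l1 i ' ' = PySem.List.pyGetD l2 (i-1) ' ' ∧
            PySem.List.pyGetD l1 (i-1) ' ' = PySem.List.pyGetD l2 i ' '
         then sv.2 + 1 else sv.2
       else sv.2))
    (samat0, 0)
  decide (sv.1 = (l1.length : Int) - 2 ∧ sv.2 = 1)

def tarkista_samankaltaisuus (sana1 : String) (sana2 : String) : Bool :=
  pvACore sana1.toList sana2.toList

-- ===== PORT B =====
-- B's body over the character lists: the list of differing indices, then its shape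
def pvBCore (l1 l2 : List Char) : Bool :=
  let diffs := (PySem.List.pyRange 0 (l1.length : Int) 1).filter
    (fun i => decide (¬ (PySem.List.pyGetD l1 i ' ' = PySem.List.pyGetD l2 i ' ')))
  match diffs with
  | [p, q] => decide (q = p + 1 ∧ PySem.List.pyGetD l1 p ' ' = PySem.List.pyGetD l2 q ' '
                      ∧ PySem.List.pyGetD l1 q ' ' = PySem.List.pyGetD l2 p ' ')
  | _ => false

def tarkista_samankaltaisuus_alt (sana1 : String) (sana2 : String) : Bool :=
  pvBCore sana1.toList sana2.toList

-- ===== PRECONDITION & SPEC =====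
-- Pre_ excludes exactly the inputs on which A raises IndexError: empty sana1 (sana1[0]),
-- or sana2 shorter than sana1 (sana2[i] out of range; sana2[0] when sana2 is empty).
def Pre_tarkista_samankaltaisuus (sana1 : String) (sana2 : String) : Prop :=
  sana1.toList ≠ [] ∧ sana1.toList.length ≤ sana2.toList.length
instance (sana1 : String) (sana2 : String) : Decidable (Pre_tarkista_samankaltaisuus sana1 sana2) := by
  unfold Pre_tarkista_samankaltaisuus; infer_instance
def pvWitness_tarkista_samankaltaisuus : String × String := ("abcd", "abdc")

def Spec_tarkista_samankaltaisuus (sana1 : String) (sana2 : String) (out : Bool) : Prop := out = tarkista_samankaltaisuus_alt sana1 sana2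
instance (sana1 : String) (sana2 : String) (out : Bool) : Decidable (Spec_tarkista_samankaltaisuus sana1 sana2 out) := by unfold Spec_tarkista_samankaltaisuus; infer_instance

-- ===== CLAIM (what is proved, stated in full; the proofs are below) =====
def Claim_equal_tarkista_samankaltaisuus : Prop := ∀ (sana1 : String) (sana2 : String), Dom_tarkista_samankaltaisuus sana1 sana2 → Pre_tarkista_samankaltaisuus sana1 sana2 → Spec_tarkista_samankaltaisuus sana1 sana2 (tarkista_samankaltaisuus sana1 sana2)
-- ===== LEMMAS AND PROOFS =====

theorem pvMain (n : Int) (hn : 0 < n) (f1 f2 : Int → Char) :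
  (decide ((if f1 0 = f2 0 then (1:Int) else 0)
      + (((PySem.List.pyRange 1 n 1).countP (fun i => decide (f1 i = f2 i)) : Int)) = n - 2
    ∧ (0:Int) + (((PySem.List.pyRange 1 n 1).countP
        (fun i => decide (¬ f1 i = f2 i ∧ (f1 i = f2 (i-1) ∧ f1 (i-1) = f2 i))) : Int)) = 1))
  = (match (PySem.List.pyRange 0 n 1).filter (fun i => decide (¬ (f1 i = f2 i))) with
     | [p, q] => decide (q = p + 1 ∧ f1 p = f2 q ∧ f1 q = f2 p)
     | _ => false) := by
  have hsplit : PySem.List.pyRange 0 n 1 = 0 :: PySem.List.pyRange 1 n 1 := by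
    simpa using PySem.List.pyRange_one_cons (a := 0) (b := n) hn
  have hlen1 : ((PySem.List.pyRange 1 n 1).length : Int) = n - 1 := by
    rw [PySem.List.length_pyRange_one]; omega
  have hcnt : ((PySem.List.pyRange 1 n 1).countP (fun i => decide (¬ (f1 i = f2 i))) : Int)
      + ((PySem.List.pyRange 1 n 1).countP (fun i => decide (f1 i = f2 i))) = n - 1 := by
    have h := List.length_eq_countP_add_countP (l := PySem.List.pyRange 1 n 1)
      (p := fun i => decide (f1 i = f2 i))
    have h2 : (PySem.List.pyRange 1 n 1).countP
        (fun a => decide (¬ (decide (f1 a = f2 a) = true)))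
        = (PySem.List.pyRange 1 n 1).countP (fun i => decide (¬ (f1 i = f2 i))) :=
      List.countP_congr (fun x _ => by simp)
    rw [h2] at h
    omega
  have hflen : ((PySem.List.pyRange 1 n 1).filter (fun i => decide (¬ (f1 i = f2 i)))).length
      = (PySem.List.pyRange 1 n 1).countP (fun i => decide (¬ (f1 i = f2 i))) :=
    List.countP_eq_length_filter.symm
  have hA1 : ((if f1 0 = f2 0 then (1:Int) else 0)
      + (((PySem.List.pyRange 1 n 1).countP (fun i => decide (f1 i = f2 i)) : Int)) = n - 2)
      ↔ ((PySem.List.pyRange 0 n 1).filter (fun i => decide (¬ (f1 i = f2 i)))).length = 2 := by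
    by_cases h0 : f1 0 = f2 0
    · have e1 : (if f1 0 = f2 0 then (1:Int) else 0) = 1 := if_pos h0
      have e2 : (PySem.List.pyRange 0 n 1).filter (fun i => decide (¬ (f1 i = f2 i)))
          = (PySem.List.pyRange 1 n 1).filter (fun i => decide (¬ (f1 i = f2 i))) := by
        rw [hsplit, List.filter_cons]; simp [h0]
      rw [e1, e2, hflen]; omega
    · have e1 : (if f1 0 = f2 0 then (1:Int) else 0) = 0 := if_neg h0
      have e2 : (PySem.List.pyRange 0 n 1).filter (fun i => decide (¬ (f1 i = f2 i)))
          = 0 :: (PySem.List.pyRange 1 n 1).filter (fun i => decide (¬ (f1 i = f2 i))) := by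
        rw [hsplit, List.filter_cons]; simp [h0]
      rw [e1, e2, List.length_cons, hflen]; omega
  rcases hd : (PySem.List.pyRange 0 n 1).filter (fun i => decide (¬ (f1 i = f2 i)))
    with _ | ⟨p, _ | ⟨q, _ | ⟨r, t⟩⟩⟩
  · rw [hd] at hA1
    refine decide_eq_false ?_
    rintro ⟨hx, -⟩
    have := hA1.mp hx
    simp only [List.length_nil] at this
    omega
  · rw [hd] at hA1
    refine decide_eq_false ?_
    rintro ⟨hx, -⟩
    have := hA1.mp hx
    simp only [List.length_cons, List.length_nil] at this
    omega
  · -- diffs = [p, q]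
    rw [hd] at hA1
    have hA1' : (if f1 0 = f2 0 then (1:Int) else 0)
        + (((PySem.List.pyRange 1 n 1).countP (fun i => decide (f1 i = f2 i)) : Int)) = n - 2 :=
      hA1.mpr (by simp)
    have hp := List.mem_filter.mp (by rw [hd]; simp :
      p ∈ (PySem.List.pyRange 0 n 1).filter (fun i => decide (¬ (f1 i = f2 i))))
    have hq := List.mem_filter.mp (by rw [hd]; simp :
      q ∈ (PySem.List.pyRange 0 n 1).filter (fun i => decide (¬ (f1 i = f2 i))))
    have hpb := PySem.List.mem_pyRange_one.mp hp.1
    have hqb := PySem.List.mem_pyRange_one.mp hq.1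
    have hpne : ¬ (f1 p = f2 p) := of_decide_eq_true hp.2
    have hqne : ¬ (f1 q = f2 q) := of_decide_eq_true hq.2
    have hlt : p < q := by
      have hpw := (PySem.List.pairwise_lt_pyRange_one (a := 0) (b := n)).filter
        (fun i => decide (¬ (f1 i = f2 i)))
      rw [hd] at hpw
      exact (List.pairwise_cons.mp hpw).1 q (by simp)
    have hEother : ∀ i : Int, 0 ≤ i → i < n → i ≠ p → i ≠ q → f1 i = f2 i := by
      intro i h0 hin hip hiq
      by_contra hne
      have hmem : i ∈ (PySem.List.pyRange 0 n 1).filter (fun i => decide (¬ (f1 i = f2 i))) :=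
        List.mem_filter.mpr ⟨PySem.List.mem_pyRange_one.mpr ⟨h0, hin⟩, by simp [hne]⟩
      rw [hd] at hmem
      simp at hmem
      tauto
    have hiffmem : ∀ i ∈ PySem.List.pyRange 1 n 1,
        ((¬ f1 i = f2 i ∧ (f1 i = f2 (i-1) ∧ f1 (i-1) = f2 i)))
        ↔ (i = q ∧ (q = p + 1 ∧ f1 p = f2 q ∧ f1 q = f2 p)) := by
      intro i hi
      have hib := PySem.List.mem_pyRange_one.mp hi
      constructor
      · rintro ⟨hne, hc1, hc2⟩
        have hipq : i = p ∨ i = q := by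
          by_contra h
          exact hne (hEother i (by omega) hib.2 (fun e => h (Or.inl e)) (fun e => h (Or.inr e)))
        rcases hipq with rfl | rfl
        · have hpm1 : f1 (i-1) = f2 (i-1) :=
            hEother (i-1) (by omega) (by omega) (by omega) (by omega)
          exact absurd ((hc1.trans hpm1.symm).trans hc2) hne
        · by_cases hadj : i = p + 1
          · have e : i - 1 = p := by omega
            rw [e] at hc1 hc2
            exact ⟨rfl, hadj, hc2, hc1⟩
          · exfalso
            have hqm1 : f1 (i-1) = f2 (i-1) :=
              hEother (i-1) (by omega) (by omega) (by omega) (by omega)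
            exact hne ((hc1.trans hqm1.symm).trans hc2)
      · rintro ⟨rfl, hadj, hcr1, hcr2⟩
        have e : i - 1 = p := by omega
        rw [e]
        exact ⟨hqne, hcr2, hcr1⟩
    have hcongr : (PySem.List.pyRange 1 n 1).countP
          (fun i => decide ((¬ f1 i = f2 i ∧ (f1 i = f2 (i-1) ∧ f1 (i-1) = f2 i))))
        = (PySem.List.pyRange 1 n 1).countP
          (fun i => decide (i = q ∧ (q = p + 1 ∧ f1 p = f2 q ∧ f1 q = f2 p))) :=
      List.countP_congr (fun x hx => by
        simp only [decide_eq_true_eq]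
        exact hiffmem x hx)
    by_cases hR : q = p + 1 ∧ f1 p = f2 q ∧ f1 q = f2 p
    · have hone : (PySem.List.pyRange 1 n 1).countP
          (fun i => decide (i = q ∧ (q = p + 1 ∧ f1 p = f2 q ∧ f1 q = f2 p))) = 1 := by
        have hc : (PySem.List.pyRange 1 n 1).countP
            (fun i => decide (i = q ∧ (q = p + 1 ∧ f1 p = f2 q ∧ f1 q = f2 p)))
            = (PySem.List.pyRange 1 n 1).countP (fun i => decide (i = q)) :=
          List.countP_congr (fun x _ => by
            simp only [decide_eq_true_eq]
            exact ⟨fun h => h.1, fun h => ⟨h, hR⟩⟩)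
        have hc2 : (PySem.List.pyRange 1 n 1).countP (fun i => decide (i = q))
            = (PySem.List.pyRange 1 n 1).count q :=
          List.countP_congr (fun x _ => by simp)
        rw [hc, hc2]
        exact List.count_eq_one_of_mem (PySem.List.nodup_pyRange_one 1 n)
          (PySem.List.mem_pyRange_one.mpr ⟨by omega, hqb.2⟩)
      rw [hcongr, hone]
      exact decide_eq_decide.mpr ⟨fun _ => hR, fun _ => ⟨hA1', by norm_num⟩⟩
    · have hzero : (PySem.List.pyRange 1 n 1).countP
          (fun i => decide (i = q ∧ (q = p + 1 ∧ f1 p = f2 q ∧ f1 q = f2 p))) = 0 :=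
        List.countP_eq_zero.mpr (fun x _ => by
          simp only [decide_eq_true_eq]
          rintro ⟨-, hRR⟩
          exact hR hRR)
      rw [hcongr, hzero]
      exact decide_eq_decide.mpr ⟨fun h => absurd h.2 (by norm_num), fun h => absurd h hR⟩
  · rw [hd] at hA1
    refine decide_eq_false ?_
    rintro ⟨hx, -⟩
    have := hA1.mp hx
    simp only [List.length_cons] at this
    omega

theorem pvCore_eq (l1 l2 : List Char) (h1 : l1 ≠ []) (_h2 : l1.length ≤ l2.length) :
    pvACore l1 l2 = pvBCore l1 l2 := by
  have hn : (0:Int) < (l1.length : Int) := by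
    have := List.length_pos_iff.mpr h1; exact_mod_cast this
  unfold pvACore pvBCore
  dsimp only []
  rw [PySem.List.foldl_prod_mk
    (f := fun s i => if PySem.List.pyGetD l1 i ' ' = PySem.List.pyGetD l2 i ' ' then s + 1 else s)
    (g := fun v i => if ¬ (PySem.List.pyGetD l1 i ' ' = PySem.List.pyGetD l2 i ' ') then
         if PySem.List.pyGetD l1 i ' ' = PySem.List.pyGetD l2 (i-1) ' ' ∧
            PySem.List.pyGetD l1 (i-1) ' ' = PySem.List.pyGetD l2 i ' '
         then v + 1 else v
       else v)]
  rw [PySem.List.foldl_ite_add_one]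
  dsimp only []
  have hfun : (fun (v : Int) i => if ¬ (PySem.List.pyGetD l1 i ' ' = PySem.List.pyGetD l2 i ' ') then
         if PySem.List.pyGetD l1 i ' ' = PySem.List.pyGetD l2 (i-1) ' ' ∧
            PySem.List.pyGetD l1 (i-1) ' ' = PySem.List.pyGetD l2 i ' '
         then v + 1 else v
       else v)
      = (fun (v : Int) i =>
      if (¬ (PySem.List.pyGetD l1 i ' ' = PySem.List.pyGetD l2 i ' ') ∧
          (PySem.List.pyGetD l1 i ' ' = PySem.List.pyGetD l2 (i-1) ' ' ∧
           PySem.List.pyGetD l1 (i-1) ' ' = PySem.List.pyGetD l2 i ' ')) then v + 1 else v) := by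
    funext v i; split_ifs <;> tauto
  rw [hfun]
  rw [PySem.List.foldl_ite_add_one]
  exact pvMain (l1.length : Int) hn (fun i => PySem.List.pyGetD l1 i ' ') (fun i => PySem.List.pyGetD l2 i ' ')

-- ===== VERDICT (by name: the statement is the Claim_ definition above) =====
theorem tarkista_samankaltaisuus_spec : Claim_equal_tarkista_samankaltaisuus := by
  intro s1 s2 _ hpre
  unfold Spec_tarkista_samankaltaisuus tarkista_samankaltaisuus tarkista_samankaltaisuus_alt
  exact pvCore_eq _ _ hpre.1 hpre.2
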